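-- pv_equiv track=rewrite | github.com/VerstraeteBert/algos-ds | test/vraag4/src/warmste-week/324.py | gift_inschrijven
-- ===== SOURCE A (Python) =====
-- def gift_inschrijven(tuple, woordenlijst):
--     check = 0
--     for element in woordenlijst:
--         if element == tuple[0]:
--             woordenlijst[element] = woordenlijst[element] + tuple[-1]
--             check = 1
--     if check == 0:
--         woordenlijst[tuple[0]] = tuple[-1]
--     return woordenlijst
-- ===== SOURCE B (Python) =====
-- def gift_inschrijven(tuple, woordenlijst):
--     # Rebuild a NEW dict in one early-exiting pass over the items:
--     # replace the first matching key's value, copy the untouched tail,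
--     # or append the new pair if the key never appears.
--     key, val = tuple[0], tuple[-1]
--     out = []
--     it = iter(woordenlijst.items())
--     for k, v in it:
--         if k == key:
--             out.append((k, v + val))
--             out.extend(it)
--             return dict(out)
--         out.append((k, v))
--     out.append((key, val))
--     return dict(out)
-- ===== Notes on version B (the rewrite author's own statement) =====
-- stated objective: alternative
-- what changed: B rebuilds a fresh dict in one early-exiting pass over the items (replace the first matching pair, copy the remaining tail verbatim, append the pair if absent) instead of A's full key scan with a check flag mutating the dict in place; B does not mutate the caller's dict.
import Mathlib
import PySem

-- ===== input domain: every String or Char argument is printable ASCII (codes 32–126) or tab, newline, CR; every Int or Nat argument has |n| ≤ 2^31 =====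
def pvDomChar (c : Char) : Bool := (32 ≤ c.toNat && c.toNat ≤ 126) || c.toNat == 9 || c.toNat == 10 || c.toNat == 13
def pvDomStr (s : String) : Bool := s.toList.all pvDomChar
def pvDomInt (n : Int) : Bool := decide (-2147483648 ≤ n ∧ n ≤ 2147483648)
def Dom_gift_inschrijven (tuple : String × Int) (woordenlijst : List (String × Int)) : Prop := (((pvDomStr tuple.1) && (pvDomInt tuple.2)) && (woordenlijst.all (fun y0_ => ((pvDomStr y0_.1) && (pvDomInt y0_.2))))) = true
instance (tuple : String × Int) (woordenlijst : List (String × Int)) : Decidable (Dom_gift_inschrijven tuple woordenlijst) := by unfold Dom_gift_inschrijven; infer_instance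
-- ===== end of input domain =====

-- B rebuilds a fresh dict in one early-exiting pass over the items instead of A's
-- full key scan with a check flag mutating the dict in place (objective: alternative).
-- A mutates and returns the caller's dict; B builds and returns a NEW dict: the
-- equivalence proved here is about the RETURN value only.

-- ===== PORT A =====
-- A iterates 'for element in woordenlijst' (the dict's keys), incrementing on a
-- match and setting check = 1; afterwards it inserts tuple[0] ↦ tuple[-1] if
-- check is still 0.  woordenlijst[element] is ported as getD element 0: the
-- looked-up key is always present (it came from the key list and the loop only
-- overwrites values), so the default is never consulted.
def gift_inschrijven (tuple : String × Int) (woordenlijst : List (String × Int)) : List (String × Int) :=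
  let d0 : PySem.Dict String Int := PySem.Dict.mk woordenlijst
  let s := d0.keys.foldl
    (fun (s : PySem.Dict String Int × Int) element =>
      if element == tuple.1 then
        (s.1.insert element (s.1.getD element 0 + tuple.2), 1)
      else s)
    (d0, 0)
  (if s.2 == 0 then s.1.insert tuple.1 tuple.2 else s.1).items

-- ===== PORT B =====
-- B's loop over woordenlijst.items() with the 'out' accumulator, early return on
-- the first match (then the rest of the iterator is copied verbatim), and the
-- append-if-absent after the loop; dict(out) is PySem.Dict.ofList.
def pvRebuild (key : String) (val : Int) : List (String × Int) → List (String × Int) → List (String × Int)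
  | out, [] => out ++ [(key, val)]
  | out, (k, v) :: rest =>
      if k == key then (out ++ [(k, v + val)]) ++ rest
      else pvRebuild key val (out ++ [(k, v)]) rest

def gift_inschrijven_alt (tuple : String × Int) (woordenlijst : List (String × Int)) : List (String × Int) :=
  (PySem.Dict.ofList (pvRebuild tuple.1 tuple.2 [] (PySem.Dict.mk woordenlijst).items)).items

-- ===== PRECONDITION & SPEC =====
-- Pre_ excludes association lists with duplicate keys: they do not represent any
-- Python dict (a Python dict's keys are unique), so A never receives them.
def Pre_gift_inschrijven (tuple : String × Int) (woordenlijst : List (String × Int)) : Prop :=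
  (woordenlijst.map Prod.fst).Nodup
instance (tuple : String × Int) (woordenlijst : List (String × Int)) : Decidable (Pre_gift_inschrijven tuple woordenlijst) := by unfold Pre_gift_inschrijven; infer_instance

def pvWitness_gift_inschrijven : (String × Int) × (List (String × Int)) :=
  (("a", 3), [("a", 1), ("b", 2)])

def Spec_gift_inschrijven (tuple : String × Int) (woordenlijst : List (String × Int)) (out : List (String × Int)) : Prop := out = gift_inschrijven_alt tuple woordenlijst
instance (tuple : String × Int) (woordenlijst : List (String × Int)) (out : List (String × Int)) : Decidable (Spec_gift_inschrijven tuple woordenlijst out) := by unfold Spec_gift_inschrijven; infer_instance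

-- ===== CLAIM (what is proved, stated in full; the proofs are below) =====
def Claim_equal_gift_inschrijven : Prop := ∀ (tuple : String × Int) (woordenlijst : List (String × Int)), Dom_gift_inschrijven tuple woordenlijst → Pre_gift_inschrijven tuple woordenlijst → Spec_gift_inschrijven tuple woordenlijst (gift_inschrijven tuple woordenlijst)

-- ===== LEMMAS AND PROOFS =====

-- A's loop body, named for the lemmas below.
def pvStepA (k : String) (v : Int) (s : PySem.Dict String Int × Int) (element : String) :
    PySem.Dict String Int × Int :=
  if element == k then (s.1.insert element (s.1.getD element 0 + v), 1) else s

-- A's fold over keys none of which is k leaves the state unchanged.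
theorem pvFoldA_miss (k : String) (v : Int) (l : List String)
    (h : ∀ x ∈ l, x ≠ k) (init : PySem.Dict String Int × Int) :
    l.foldl (pvStepA k v) init = init := by
  induction l generalizing init with
  | nil => rfl
  | cons e rest ih =>
    have he : e ≠ k := h e (by simp)
    simp only [List.foldl_cons, pvStepA, beq_iff_eq, if_neg he]
    exact ih (fun x hx => h x (by simp [hx])) init

-- A's fold over a Nodup key list containing k performs exactly one insert and sets check.
theorem pvFoldA_hit (k : String) (v : Int) (l : List String)
    (hnd : l.Nodup) (hk : k ∈ l) (d : PySem.Dict String Int) :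
    l.foldl (pvStepA k v) (d, 0) = (d.insert k (d.getD k 0 + v), 1) := by
  induction l generalizing d with
  | nil => simp at hk
  | cons e rest ih =>
    rcases List.nodup_cons.mp hnd with ⟨hnotin, hndr⟩
    by_cases he : e = k
    · subst he
      simp only [List.foldl_cons, pvStepA, beq_self_eq_true]
      exact pvFoldA_miss e v rest (fun x hx hxe => hnotin (hxe ▸ hx)) _
    · simp only [List.foldl_cons, pvStepA, beq_iff_eq, if_neg he]
      exact ih hndr ((List.mem_cons.mp hk).resolve_left (fun h => he h.symm)) d

-- B's accumulator recursion prepends the accumulator to the no-accumulator result.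
theorem pvRebuild_acc (key : String) (val : Int) (out l : List (String × Int)) :
    pvRebuild key val out l = out ++ pvRebuild key val [] l := by
  induction l generalizing out with
  | nil => simp [pvRebuild]
  | cons p rest ih =>
    obtain ⟨k, v⟩ := p
    by_cases hk : k = key
    · simp [pvRebuild, hk]
    · simp only [pvRebuild, beq_iff_eq, if_neg hk]
      rw [ih (out ++ [(k, v)])]
      rw [show pvRebuild key val ([] ++ [(k, v)]) rest = pvRebuild key val [(k, v)] rest from rfl]
      rw [ih [(k, v)]]
      simp

-- On a list whose keys avoid key, B appends the new pair.
theorem pvRebuild_miss (key : String) (val : Int) (l : List (String × Int))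
    (h : key ∉ l.map Prod.fst) :
    pvRebuild key val [] l = l ++ [(key, val)] := by
  induction l with
  | nil => rfl
  | cons p rest ih =>
    obtain ⟨k, v⟩ := p
    have hk : k ≠ key := fun he => h (by simp [he])
    simp only [pvRebuild, beq_iff_eq, if_neg hk]
    rw [pvRebuild_acc, ih (fun hm => h (by simp [List.mem_cons]; exact Or.inr (by simpa using hm)))]
    simp

-- Map with a fst-replacing function is identity when the key is absent.
theorem pvMapRepl_id (key : String) (w : Int) (l : List (String × Int))
    (h : key ∉ l.map Prod.fst) :
    l.map (fun p => if p.1 == key then (key, w) else p) = l := by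
  induction l with
  | nil => rfl
  | cons p rest ih =>
    have hk : p.1 ≠ key := fun he => h (by simp [he])
    have h2 : key ∉ rest.map Prod.fst := fun hm =>
      h (by rw [List.map_cons]; exact List.mem_cons_of_mem _ hm)
    simp only [List.map_cons]
    rw [if_neg (by simp [hk] : ¬((p.1 == key) = true)), ih h2]

-- On a Nodup-key list containing (key, w), B's rebuild is the pointwise replacement.
theorem pvRebuild_hit (key : String) (val w : Int) (l : List (String × Int))
    (hnd : (l.map Prod.fst).Nodup) (hw : (key, w) ∈ l) :
    pvRebuild key val [] l = l.map (fun p => if p.1 == key then (key, w + val) else p) := by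
  induction l with
  | nil => simp at hw
  | cons p rest ih =>
    obtain ⟨k, v⟩ := p
    have hnd' : (k :: rest.map Prod.fst).Nodup := by simpa using hnd
    rcases List.nodup_cons.mp hnd' with ⟨hnotin, hndr⟩
    by_cases hk : k = key
    · subst hk
      have hvw : w = v := by
        rcases List.mem_cons.mp hw with h | h
        · exact (Prod.ext_iff.mp h).2
        · exact absurd (List.mem_map.mpr ⟨(k, w), h, rfl⟩) hnotin
      subst hvw
      simp only [pvRebuild, beq_self_eq_true, if_true, List.map_cons, List.nil_append,
        List.singleton_append]
      rw [pvMapRepl_id k (w + val) rest hnotin]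
    · have hw' : (key, w) ∈ rest := by
        rcases List.mem_cons.mp hw with h | h
        · exact absurd (congrArg Prod.fst h).symm hk
        · exact h
      simp only [pvRebuild, beq_iff_eq, if_neg hk, List.map_cons]
      rw [pvRebuild_acc, ih hndr hw']
      simp

-- dict(pairs) on a Nodup-key pair list returns exactly those pairs.
theorem pvItems_ofList {l : List (String × Int)} (h : (l.map Prod.fst).Nodup) :
    (PySem.Dict.ofList l).items = l := by
  have := PySem.Dict.items_foldl_insert_fresh l Prod.fst Prod.snd (PySem.Dict.empty)
    (by simp [PySem.Dict.contains_empty]) h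
  simpa [PySem.Dict.ofList, PySem.Dict.update] using this

-- Replacement preserves the key list.
theorem pvMapRepl_keys (key : String) (w : Int) (l : List (String × Int)) :
    (l.map (fun p => if p.1 == key then (key, w) else p)).map Prod.fst = l.map Prod.fst := by
  induction l with
  | nil => rfl
  | cons p rest ih =>
    simp only [List.map_cons]
    by_cases hk : p.1 = key
    · rw [if_pos (by simp [hk] : (p.1 == key) = true), ih]; simp [hk]
    · rw [if_neg (by simp [hk] : ¬((p.1 == key) = true)), ih]

-- ===== VERDICT (by name: the statement is the Claim_ definition above) =====
theorem gift_inschrijven_spec : Claim_equal_gift_inschrijven := by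
  intro tuple wl _hD hPre
  unfold Spec_gift_inschrijven gift_inschrijven gift_inschrijven_alt
  have hitems : (PySem.Dict.mk wl).items = wl := rfl
  have hkeys : (PySem.Dict.mk wl).keys = wl.map Prod.fst := by
    simp [PySem.Dict.keys]
  have hnd : (PySem.Dict.mk wl).keys.Nodup := by rw [hkeys]; exact hPre
  simp only [show (fun (s : PySem.Dict String Int × Int) element =>
      if element == tuple.1 then (s.1.insert element (s.1.getD element 0 + tuple.2), 1) else s)
      = pvStepA tuple.1 tuple.2 from rfl]
  by_cases hmem : tuple.1 ∈ wl.map Prod.fst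
  · -- key present: A overwrites in place; B replaces the first (only) matching pair
    have hmemk : tuple.1 ∈ (PySem.Dict.mk wl).keys := by rw [hkeys]; exact hmem
    rw [pvFoldA_hit tuple.1 tuple.2 _ hnd hmemk (PySem.Dict.mk wl)]
    have hc : (PySem.Dict.mk wl).contains tuple.1 = true := by
      rw [PySem.Dict.contains_eq_decide_mem_keys]; simpa using hmemk
    have hAitems := PySem.Dict.items_insert_of_contains
      (PySem.Dict.mk wl) ((PySem.Dict.mk wl).getD tuple.1 0 + tuple.2) hc
    -- the looked-up value: (tuple.1, getD tuple.1 0) ∈ wl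
    have hget : (PySem.Dict.mk wl).get? tuple.1 =
        some ((PySem.Dict.mk wl).getD tuple.1 0) := by
      have h : ((PySem.Dict.mk wl).get? tuple.1).isSome = true := by
        rw [← PySem.Dict.contains_eq_isSome_get?]; exact hc
      rcases Option.isSome_iff_exists.mp h with ⟨v, hv⟩
      rw [hv, PySem.Dict.getD_of_get?_eq_some _ _ hv]
    have hwmem : (tuple.1, (PySem.Dict.mk wl).getD tuple.1 0) ∈ wl := by
      have := PySem.Dict.mem_items_of_get?_eq_some _ hget
      rwa [hitems] at this
    have hB := pvRebuild_hit tuple.1 tuple.2 ((PySem.Dict.mk wl).getD tuple.1 0) wl hPre hwmem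
    have hndB : ((pvRebuild tuple.1 tuple.2 [] wl).map Prod.fst).Nodup := by
      rw [hB, pvMapRepl_keys]; exact hPre
    simp only [beq_iff_eq, if_neg (one_ne_zero)]
    rw [hAitems, hitems, pvItems_ofList hndB, hB]
  · -- key absent: A appends after the loop; B appends after the pass
    have hnm : ∀ x ∈ (PySem.Dict.mk wl).keys, x ≠ tuple.1 := by
      rw [hkeys]; exact fun x hx he => hmem (he ▸ hx)
    rw [pvFoldA_miss tuple.1 tuple.2 _ hnm ((PySem.Dict.mk wl), 0)]
    have hc : (PySem.Dict.mk wl).contains tuple.1 = false := by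
      rw [PySem.Dict.contains_eq_decide_mem_keys]
      simp only [hkeys]; simpa using hmem
    have hAitems := PySem.Dict.items_insert_of_not_contains
      (PySem.Dict.mk wl) tuple.2 hc
    have hB := pvRebuild_miss tuple.1 tuple.2 wl hmem
    have hndB : ((pvRebuild tuple.1 tuple.2 [] wl).map Prod.fst).Nodup := by
      rw [hB]
      simp only [List.map_append, List.map_cons, List.map_nil]
      exact List.Nodup.append hPre (List.nodup_singleton _)
        (by intro a ha hb; simp at hb; subst hb; exact hmem ha)
    simp only [beq_self_eq_true, if_true]
    rw [hAitems, hitems, pvItems_ofList hndB, hB]
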